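-- pv_equiv track=rewrite | github.com/Havmaagen/Competitive-programming | Solutions/2081. Sum of k-Mirror Numbers.py | is_k_mirror
-- ===== SOURCE A (Python) =====
-- def is_k_mirror(k, num):
--     s = []
--     while num:
--         s.append(num % k)
--         num //= k
--
--     d = len(s)
--     val = all(s[i] == s[-(i + 1)] for i in range(d // 2))
--
--     return val
-- ===== SOURCE B (Python) =====
-- def is_k_mirror(k, num):
--     rev, temp = 0, num
--     while temp:
--         rev = rev * k + temp % k
--         temp //= k
--     return rev == num
-- ===== Notes on version B (the rewrite author's own statement) =====
-- stated objective: simpler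
-- what changed: B keeps a single running integer and builds the base-k reversal arithmetically (rev = rev*k + temp%k), returning rev == num, instead of materialising the digit list and comparing it index-by-index with a half-range two-pointer scan.
import Mathlib
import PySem

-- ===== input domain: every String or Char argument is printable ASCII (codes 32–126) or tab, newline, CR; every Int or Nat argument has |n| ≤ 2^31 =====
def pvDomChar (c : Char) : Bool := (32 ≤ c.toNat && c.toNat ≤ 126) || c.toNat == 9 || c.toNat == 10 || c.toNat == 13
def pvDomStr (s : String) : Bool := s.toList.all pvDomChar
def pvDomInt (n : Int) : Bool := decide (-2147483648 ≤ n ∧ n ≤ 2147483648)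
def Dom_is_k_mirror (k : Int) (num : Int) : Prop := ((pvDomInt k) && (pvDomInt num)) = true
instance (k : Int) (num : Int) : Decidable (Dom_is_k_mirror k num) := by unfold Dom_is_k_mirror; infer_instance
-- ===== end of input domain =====

-- B replaces A's digit list + half-range index comparison by a single running integer
-- (the arithmetic base-k reversal) compared once against num: simpler, O(1) extra space.

-- ===== PORT A =====
-- the while-loop building s (append order d0, d1, …), made total with fuel 2*|num|+2
-- (inside Pre_ the loop ends strictly before the fuel runs out, proved below)
def pvDigitsGo (k : Int) : Nat → Int → List Int
  | 0, _ => []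
  | fuel + 1, num =>
    if num = 0 then []
    else PySem.Int.mod num k :: pvDigitsGo k fuel (PySem.Int.floordiv num k)

def is_k_mirror (k : Int) (num : Int) : Bool :=
  let s := pvDigitsGo k (2 * num.natAbs + 2) num
  let d : Int := (s.length : Int)
  (PySem.List.pyRange 0 (PySem.Int.floordiv d 2) 1).all
    (fun i => PySem.List.pyGetD s i 0 == PySem.List.pyGetD s (-(i + 1)) 0)

-- ===== PORT B =====
-- the while-loop 'rev = rev*k + temp%k; temp //= k', same fuel guard
def pvRevLoopGo (k : Int) : Nat → Int → Int → Int
  | 0, _, rev => rev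
  | fuel + 1, temp, rev =>
    if temp = 0 then rev
    else pvRevLoopGo k fuel (PySem.Int.floordiv temp k) (rev * k + PySem.Int.mod temp k)

def is_k_mirror_alt (k : Int) (num : Int) : Bool :=
  pvRevLoopGo k (2 * num.natAbs + 2) num 0 == num

-- ===== PRECONDITION & SPEC =====
-- Pre_ = exactly where the Python A returns: k = 0 raises ZeroDivisionError (num ≠ 0), and the
-- loop never terminates for k ∈ {-1, 1} with num ≠ 0 or for 2 ≤ k with num < 0 (num//k sticks at -1).
def Pre_is_k_mirror (k : Int) (num : Int) : Prop := num = 0 ∨ (2 ≤ k ∧ 0 ≤ num) ∨ k ≤ -2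
instance (k : Int) (num : Int) : Decidable (Pre_is_k_mirror k num) := by unfold Pre_is_k_mirror; infer_instance
def pvWitness_is_k_mirror : Int × Int := (2, 5)

def Spec_is_k_mirror (k : Int) (num : Int) (out : Bool) : Prop := out = is_k_mirror_alt k num
instance (k : Int) (num : Int) (out : Bool) : Decidable (Spec_is_k_mirror k num out) := by unfold Spec_is_k_mirror; infer_instance

-- ===== CLAIM (what is proved, stated in full; the proofs are below) =====
def Claim_equal_is_k_mirror : Prop := ∀ (k : Int) (num : Int), Dom_is_k_mirror k num → Pre_is_k_mirror k num → Spec_is_k_mirror k num (is_k_mirror k num)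

-- ===== LEMMAS AND PROOFS =====

-- loop measure: it strictly decreases on the terminating region, so the fuel never runs out there
def pvMeas (k num : Int) : Nat := 2 * num.natAbs + (if 0 < num ∧ k < 0 then 1 else 0)

theorem pvMeas_dec (k num : Int) (h0 : ¬ num = 0) (hg : k ≤ -2 ∨ (2 ≤ k ∧ 0 < num)) :
    pvMeas k (PySem.Int.floordiv num k) < pvMeas k num := by
  have hqr := PySem.Int.floordiv_mul_add_mod num k
  set q := PySem.Int.floordiv num k with hq
  set r := PySem.Int.mod num k with hr
  rcases hg with hk | ⟨hk, hnum⟩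
  · have hb := PySem.Int.mod_neg_bounds num (b := k) (by omega)
    rw [← hr] at hb
    rcases lt_trichotomy num 0 with hn | hn | hn
    · have hq0 : 0 ≤ q := by nlinarith
      have h2q : 2 * q ≤ -num := by nlinarith
      unfold pvMeas; split_ifs <;> omega
    · omega
    · have hq1 : q ≤ -1 := by nlinarith
      have hge : -num ≤ q := by nlinarith
      unfold pvMeas; split_ifs <;> omega
  · have hb1 := PySem.Int.mod_nonneg num (b := k) (by omega)
    have hb2 := PySem.Int.mod_lt num (b := k) (by omega)
    rw [← hr] at hb1 hb2
    have hq0 : 0 ≤ q := by nlinarith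
    have hlt : q < num := by nlinarith
    unfold pvMeas; split_ifs <;> omega

-- the terminating region is preserved by one loop step
theorem pvRegion_step (k num : Int) (hr : k ≤ -2 ∨ (2 ≤ k ∧ 0 ≤ num)) :
    k ≤ -2 ∨ (2 ≤ k ∧ 0 ≤ PySem.Int.floordiv num k) := by
  rcases hr with h | ⟨h1, h2⟩
  · exact Or.inl h
  · refine Or.inr ⟨h1, ?_⟩
    have hqr := PySem.Int.floordiv_mul_add_mod num k
    have hb1 := PySem.Int.mod_nonneg num (b := k) (by omega)
    have hb2 := PySem.Int.mod_lt num (b := k) (by omega)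
    nlinarith

theorem pvGuard_of_region (k num : Int) (h0 : num ≠ 0) (hr : k ≤ -2 ∨ (2 ≤ k ∧ 0 ≤ num)) :
    k ≤ -2 ∨ (2 ≤ k ∧ 0 < num) := by
  rcases hr with h | ⟨h1, h2⟩
  · exact Or.inl h
  · exact Or.inr ⟨h1, lt_of_le_of_ne h2 (Ne.symm h0)⟩

-- base-k value of a little-endian digit list
def pvEv (k : Int) (s : List Int) : Int := s.foldr (fun d acc => acc * k + d) 0

theorem pvEv_cons (k d : Int) (s : List Int) : pvEv k (d :: s) = pvEv k s * k + d := rfl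

theorem pvEv_append_singleton (k d : Int) (s : List Int) :
    pvEv k (s ++ [d]) = pvEv k s + d * k ^ s.length := by
  induction s with
  | nil => simp [pvEv]
  | cons a t ih => simp [pvEv_cons, List.cons_append, ih, pow_succ]; ring

-- digit range of Python's % k (sign of the divisor)
def pvDigOK (k d : Int) : Prop := (0 ≤ d ∧ d < k) ∨ (k < d ∧ d ≤ 0)

theorem pvDigOK_mod (k a : Int) (hk : k ≠ 0) : pvDigOK k (PySem.Int.mod a k) := by
  rcases lt_or_gt_of_ne hk with h | h
  · exact Or.inr (PySem.Int.mod_neg_bounds a h)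
  · exact Or.inl ⟨PySem.Int.mod_nonneg a h, PySem.Int.mod_lt a h⟩

-- uniqueness of Python's divmod for in-range remainders
theorem pvDivMod_uniq (k q r a : Int) (hk : k ≠ 0) (hd : pvDigOK k r) (h : q * k + r = a) :
    q = PySem.Int.floordiv a k ∧ r = PySem.Int.mod a k := by
  have hqr := PySem.Int.floordiv_mul_add_mod a k
  have hd' := pvDigOK_mod k a hk
  set q' := PySem.Int.floordiv a k
  set r' := PySem.Int.mod a k
  have he : (q - q') * k = r' - r := by linear_combination h - hqr
  have hq : q = q' := by
    rcases lt_or_gt_of_ne hk with hkn | hkp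
    · rcases hd with ⟨h1, h2⟩ | ⟨h1, h2⟩; · omega
      rcases hd' with ⟨h3, h4⟩ | ⟨h3, h4⟩; · omega
      by_contra hne
      rcases lt_or_gt_of_ne hne with hlt | hgt
      · nlinarith
      · nlinarith
    · rcases hd with ⟨h1, h2⟩ | ⟨h1, h2⟩; swap; · omega
      rcases hd' with ⟨h3, h4⟩ | ⟨h3, h4⟩; swap; · omega
      by_contra hne
      rcases lt_or_gt_of_ne hne with hlt | hgt
      · nlinarith
      · nlinarith
  refine ⟨hq, ?_⟩
  have h0 : (q - q') * k = (q' - q') * k := by rw [hq]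
  have h1 : (q' - q') * k = 0 := by ring
  omega

theorem pvMod_mul_add (k q d : Int) (hk : k ≠ 0) (hd : pvDigOK k d) :
    PySem.Int.mod (q * k + d) k = d ∧ PySem.Int.floordiv (q * k + d) k = q := by
  have h := pvDivMod_uniq k q d (q * k + d) hk hd rfl
  exact ⟨h.2.symm, h.1.symm⟩

-- every produced digit is in range
theorem pvDigits_digOK (k : Int) (hk : k ≠ 0) : ∀ (f : Nat) (num : Int),
    ∀ d ∈ pvDigitsGo k f num, pvDigOK k d := by
  intro f
  induction f with
  | zero => intro num d hd; simp [pvDigitsGo] at hd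
  | succ f ih =>
      intro num d hd
      by_cases h0 : num = 0
      · simp [pvDigitsGo, h0] at hd
      · simp only [pvDigitsGo, if_neg h0] at hd
        rcases List.mem_cons.mp hd with rfl | hd'
        · exact pvDigOK_mod k num hk
        · exact ih _ d hd'

-- with enough fuel, the digit list evaluates back to num on the terminating region
theorem pvDigits_ev (k : Int) : ∀ (f : Nat) (num : Int), (k ≤ -2 ∨ (2 ≤ k ∧ 0 ≤ num)) →
    pvMeas k num < f → pvEv k (pvDigitsGo k f num) = num := by
  intro f
  induction f with
  | zero => intro num _ hf; omega
  | succ f ih =>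
      intro num hr hf
      by_cases h0 : num = 0
      · subst h0; simp [pvDigitsGo, pvEv]
      · have hdec := pvMeas_dec k num h0 (pvGuard_of_region k num h0 hr)
        simp only [pvDigitsGo, if_neg h0]
        rw [pvEv_cons, ih _ (pvRegion_step k num hr) (by omega)]
        exact PySem.Int.floordiv_mul_add_mod num k

-- base-k evaluation is injective on equal-length in-range digit lists
theorem pvEv_inj (k : Int) (hk : k ≠ 0) : ∀ (s t : List Int), s.length = t.length →
    (∀ d ∈ s, pvDigOK k d) → (∀ d ∈ t, pvDigOK k d) → pvEv k s = pvEv k t → s = t := by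
  intro s
  induction s with
  | nil =>
      intro t hl _ _ _
      cases t with
      | nil => rfl
      | cons b t' => simp at hl
  | cons a s' ih =>
      intro t hl hs ht he
      cases t with
      | nil => simp at hl
      | cons b t' =>
          have ha := hs a (by simp)
          have hb := ht b (by simp)
          rw [pvEv_cons, pvEv_cons] at he
          have h1 := pvMod_mul_add k (pvEv k s') a hk ha
          have h2 := pvMod_mul_add k (pvEv k t') b hk hb
          have hab : a = b := by rw [← h1.1, ← h2.1, he]
          have hev : pvEv k s' = pvEv k t' := by rw [← h1.2, ← h2.2, he]
          have hrec := ih t' (by simpa using hl) (fun d hd => hs d (List.mem_cons_of_mem _ hd))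
            (fun d hd => ht d (List.mem_cons_of_mem _ hd)) hev
          rw [hab, hrec]

-- with enough fuel, B's loop computes rev * k^n plus the value of the reversed digit list
theorem pvRevLoop_eq (k : Int) : ∀ (f : Nat) (temp rev : Int), (k ≤ -2 ∨ (2 ≤ k ∧ 0 ≤ temp)) →
    pvMeas k temp < f → pvRevLoopGo k f temp rev =
    rev * k ^ (pvDigitsGo k f temp).length + pvEv k (pvDigitsGo k f temp).reverse := by
  intro f
  induction f with
  | zero => intro temp rev _ hf; omega
  | succ f ih =>
      intro temp rev hr hf
      by_cases h0 : temp = 0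
      · subst h0; simp [pvRevLoopGo, pvDigitsGo, pvEv]
      · have hdec := pvMeas_dec k temp h0 (pvGuard_of_region k temp h0 hr)
        simp only [pvRevLoopGo, pvDigitsGo, if_neg h0]
        rw [ih _ _ (pvRegion_step k temp hr) (by omega),
          List.reverse_cons, pvEv_append_singleton, List.length_reverse, List.length_cons]
        ring

-- A's half-range index check is the palindrome property
theorem pvPal_iff (s : List Int) :
    ((PySem.List.pyRange 0 (PySem.Int.floordiv ((s.length : Int)) 2) 1).all
      (fun i => PySem.List.pyGetD s i 0 == PySem.List.pyGetD s (-(i + 1)) 0) = true) ↔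
    s.reverse = s := by
  have hcast : PySem.Int.floordiv ((s.length : Int)) 2 = ((s.length / 2 : Nat) : Int) := by
    exact_mod_cast PySem.Int.floordiv_natCast s.length 2
  rw [hcast, List.all_eq_true]
  have hidx : ∀ (n : Nat) (hn : n < s.length / 2),
      ((PySem.List.pyGetD s ((n : Int)) 0 == PySem.List.pyGetD s (-(((n : Int)) + 1)) 0) = true) ↔
      s[n]'(by omega) = s[s.length - 1 - n]'(by omega) := by
    intro n hn
    have e1 : PySem.List.pyGetD s ((n : Int)) 0 = s[n]'(by omega) := by
      rw [PySem.List.pyGetD_eq_getElem s 0 (by positivity) (by exact_mod_cast (by omega : n < s.length))]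
      simp
    have e2 : PySem.List.pyGetD s (-(((n : Int)) + 1)) 0 = s[s.length - (n + 1)]'(by omega) := by
      have hc : -(((n : Int)) + 1) = -(((n + 1 : Nat) : Int)) := by push_cast; ring
      rw [hc, PySem.List.pyGetD_neg_natCast s (n + 1) 0 (by omega) (by omega)]
    have hii : s.length - (n + 1) = s.length - 1 - n := by omega
    rw [e1, e2, beq_iff_eq]
    simp only [hii]
  constructor
  · intro h
    apply List.ext_getElem (by simp)
    intro n hn hn'
    rw [List.getElem_reverse]
    rcases Nat.lt_or_ge n (s.length / 2) with hlt | hge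
    · have hv := (hidx n hlt).mp (h ((n : Int)) (by rw [PySem.List.mem_pyRange_one]; omega))
      exact hv.symm
    · rcases Nat.lt_or_ge (s.length - 1 - n) (s.length / 2) with h2 | h2
      · have hv := (hidx _ h2).mp
          (h (((s.length - 1 - n : Nat) : Int)) (by rw [PySem.List.mem_pyRange_one]; omega))
        have hi2 : s.length - 1 - (s.length - 1 - n) = n := by omega
        simp only [hi2] at hv
        exact hv
      · have hmid : s.length - 1 - n = n := by omega
        simp only [hmid]
  · intro hrev i hi
    rw [PySem.List.mem_pyRange_one] at hi
    have hn : i = ((i.toNat : Nat) : Int) := by omega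
    have hlt : i.toNat < s.length / 2 := by omega
    rw [hn]
    refine (hidx i.toNat hlt).mpr ?_
    have hg := List.getElem_reverse (l := s) (i := i.toNat)
      (by rw [List.length_reverse]; omega)
    exact (List.getElem_of_eq hrev _).symm.trans hg

-- ===== VERDICT (by name: the statement is the Claim_ definition above) =====
theorem is_k_mirror_spec : Claim_equal_is_k_mirror := by
  intro k num _ hpre
  simp only [Spec_is_k_mirror, is_k_mirror, is_k_mirror_alt]
  by_cases h0 : num = 0
  · subst h0
    simp [pvDigitsGo, pvRevLoopGo, PySem.List.pyRange_one_eq_nil]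
  · have hk' : k ≤ -2 ∨ (2 ≤ k ∧ 0 ≤ num) := by
      rcases hpre with h | h | h
      · exact absurd h h0
      · exact Or.inr h
      · exact Or.inl h
    have hk : k ≠ 0 := by omega
    have hfuel : pvMeas k num < 2 * num.natAbs + 2 := by unfold pvMeas; split_ifs <;> omega
    set s := pvDigitsGo k (2 * num.natAbs + 2) num with hs
    have hev : pvEv k s = num := pvDigits_ev k _ num hk' hfuel
    have hrl : pvRevLoopGo k (2 * num.natAbs + 2) num 0 = pvEv k s.reverse := by
      rw [pvRevLoop_eq k _ num 0 hk' hfuel]; ring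
    rw [hrl]
    by_cases hp : s.reverse = s
    · have h1 : ((PySem.List.pyRange 0 (PySem.Int.floordiv ((s.length : Int)) 2) 1).all
        (fun i => PySem.List.pyGetD s i 0 == PySem.List.pyGetD s (-(i + 1)) 0) = true) :=
        (pvPal_iff s).mpr hp
      rw [h1, hp, hev]
      simp
    · have h1 : ((PySem.List.pyRange 0 (PySem.Int.floordiv ((s.length : Int)) 2) 1).all
        (fun i => PySem.List.pyGetD s i 0 == PySem.List.pyGetD s (-(i + 1)) 0) = false) := by
        rw [Bool.eq_false_iff]
        intro hcontra
        exact hp ((pvPal_iff s).mp hcontra)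
      rw [h1]
      have hne : pvEv k s.reverse ≠ num := by
        intro heq
        exact hp (pvEv_inj k hk s.reverse s (by simp)
          (fun d hd => pvDigits_digOK k hk _ num d (List.mem_reverse.mp hd))
          (pvDigits_digOK k hk _ num) (heq.trans hev.symm))
      exact (by simp [hne] : (pvEv k s.reverse == num) = false).symm
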